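-- pv_equiv track=rewrite | github.com/panthistle/popmesh | version 2.5/code/mpopm.py | rngids_calc
-- ===== SOURCE A (Python) =====
-- def rngids_calc(npts, k, itm, gap, reps):
--     ids = [i % npts for i in range(k, k + itm)]
--     if (npts == itm) or (reps < 2):
--         return ids
--     iinc = gap + 1
--     for i in range(reps - 1):
--         k = ids[-1] + iinc
--         ids += [j % npts for j in range(k, k + itm)]
--     return ids[:npts]
-- ===== SOURCE B (Python) =====
-- def rngids_calc(npts, k, itm, gap, reps):
--     # closed form: block i, element j is (k + i*(itm+gap) + j) % npts
--     if npts == itm or reps < 2: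
--         return [(k + j) % npts for j in range(itm)]
--     step = itm + gap
--     nblk = reps if itm > 0 else 0  # empty blocks contribute nothing
--     ids = [(k + i * step + j) % npts for i in range(nblk) for j in range(itm)]
--     return ids[:npts]
-- ===== Notes on version B (the rewrite author's own statement) =====
-- stated objective: alternative
-- what changed: B replaces A's fused append loop (each block's start read back from ids[-1]) with a closed-form nested comprehension: block i, element j is (k + i*(itm+gap) + j) % npts, since the start recurrence collapses modulo npts; the first-block guard case is emitted directly.
-- outside the precondition, e.g. on rngids_calc(5, 0, 0, 1, 3): A raises IndexError, B returns []; on rngids_calc(0, 1, 2, 0, 1): A raises ZeroDivisionError, B raises ZeroDivisionError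
-- crash fix: When itm <= 0 with npts != itm and reps >= 2, A raises IndexError on ids[-1] of the empty first block; B naturally returns []. — e.g. on rngids_calc(5, 0, 0, 1, 3): A raises IndexError, B returns []
import Mathlib
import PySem

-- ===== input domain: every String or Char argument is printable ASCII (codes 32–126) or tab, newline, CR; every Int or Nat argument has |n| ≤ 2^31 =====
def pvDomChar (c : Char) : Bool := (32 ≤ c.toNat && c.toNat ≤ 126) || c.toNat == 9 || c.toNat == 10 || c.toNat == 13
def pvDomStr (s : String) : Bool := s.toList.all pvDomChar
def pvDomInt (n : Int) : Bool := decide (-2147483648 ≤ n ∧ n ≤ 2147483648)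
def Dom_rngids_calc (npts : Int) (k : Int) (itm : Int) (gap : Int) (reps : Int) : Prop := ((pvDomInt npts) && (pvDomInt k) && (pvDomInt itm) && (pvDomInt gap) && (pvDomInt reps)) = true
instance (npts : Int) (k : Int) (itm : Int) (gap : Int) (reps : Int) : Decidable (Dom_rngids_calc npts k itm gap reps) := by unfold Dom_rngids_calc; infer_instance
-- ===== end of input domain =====

-- B replaces A's fused append loop with a closed-form nested comprehension
-- (block i starts at k + i*(itm+gap) modulo npts); same cost, alternative algorithm.


-- ===== PORT A =====
def rngids_calc (npts : Int) (k : Int) (itm : Int) (gap : Int) (reps : Int) : List Int :=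
  let ids := (PySem.List.pyRange k (k + itm) 1).map (fun i => PySem.Int.mod i npts)
  if npts == itm || decide (reps < 2) then ids
  else
    let iinc := gap + 1
    let ids := (PySem.List.pyRange 0 (reps - 1) 1).foldl
      (fun ids _i =>
        -- k = ids[-1] + iinc  (ids[-1]: total form, Pre_ guarantees ids ≠ [])
        let k := PySem.List.pyGetD ids (-1) 0 + iinc
        ids ++ (PySem.List.pyRange k (k + itm) 1).map (fun j => PySem.Int.mod j npts)) ids
    PySem.List.slice ids none (some npts)

-- ===== PORT B =====
def rngids_calc_alt (npts : Int) (k : Int) (itm : Int) (gap : Int) (reps : Int) : List Int :=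
  if npts == itm || decide (reps < 2) then
    (PySem.List.pyRange 0 itm 1).map (fun j => PySem.Int.mod (k + j) npts)
  else
    let step := itm + gap
    let nblk : Int := if itm > 0 then reps else 0
    let ids := (PySem.List.pyRange 0 nblk 1).flatMap
      (fun i => (PySem.List.pyRange 0 itm 1).map (fun j => PySem.Int.mod (k + i * step + j) npts))
    PySem.List.slice ids none (some npts)

-- ===== PRECONDITION & SPEC =====
-- Pre_ excludes exactly the inputs where the Python A raises: npts = 0 with a nonempty
-- first block (ZeroDivisionError on '% npts'), and itm ≤ 0 when the loop runs
-- (IndexError on ids[-1] of the empty list).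
def Pre_rngids_calc (npts : Int) (k : Int) (itm : Int) (gap : Int) (reps : Int) : Prop :=
  (1 ≤ itm → npts ≠ 0) ∧ (itm ≤ 0 → (npts = itm ∨ reps < 2))
instance (npts : Int) (k : Int) (itm : Int) (gap : Int) (reps : Int) : Decidable (Pre_rngids_calc npts k itm gap reps) := by unfold Pre_rngids_calc; infer_instance
def pvWitness_rngids_calc : Int × Int × Int × Int × Int := (5, 2, 3, 1, 4)

-- When itm ≤ 0 with npts ≠ itm and reps ≥ 2, A raises IndexError on ids[-1] of the
-- empty first block; B naturally returns [].
def Raises_rngids_calc (npts : Int) (k : Int) (itm : Int) (gap : Int) (reps : Int) : Prop :=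
  itm ≤ 0 ∧ npts ≠ itm ∧ 2 ≤ reps
instance (npts : Int) (k : Int) (itm : Int) (gap : Int) (reps : Int) : Decidable (Raises_rngids_calc npts k itm gap reps) := by unfold Raises_rngids_calc; infer_instance
def pvRaiseWitness_rngids_calc : Int × Int × Int × Int × Int := (5, 0, 0, 1, 3)
def pvRaiseWitnessOut_rngids_calc : List Int := []

def Spec_rngids_calc (npts : Int) (k : Int) (itm : Int) (gap : Int) (reps : Int) (out : List Int) : Prop := out = rngids_calc_alt npts k itm gap reps
instance (npts : Int) (k : Int) (itm : Int) (gap : Int) (reps : Int) (out : List Int) : Decidable (Spec_rngids_calc npts k itm gap reps out) := by unfold Spec_rngids_calc; infer_instance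

-- ===== CLAIM (what is proved, stated in full; the proofs are below) =====
def Claim_equal_rngids_calc : Prop := ∀ (npts : Int) (k : Int) (itm : Int) (gap : Int) (reps : Int), Dom_rngids_calc npts k itm gap reps → Pre_rngids_calc npts k itm gap reps → Spec_rngids_calc npts k itm gap reps (rngids_calc npts k itm gap reps)
def Claim_raises_rngids_calc : Prop := (∀ (npts : Int) (k : Int) (itm : Int) (gap : Int) (reps : Int), Dom_rngids_calc npts k itm gap reps → Raises_rngids_calc npts k itm gap reps → ¬ Pre_rngids_calc npts k itm gap reps) ∧ (Dom_rngids_calc (pvRaiseWitness_rngids_calc.1) (pvRaiseWitness_rngids_calc.2.1) (pvRaiseWitness_rngids_calc.2.2.1) (pvRaiseWitness_rngids_calc.2.2.2.1) (pvRaiseWitness_rngids_calc.2.2.2.2) ∧ Raises_rngids_calc (pvRaiseWitness_rngids_calc.1) (pvRaiseWitness_rngids_calc.2.1) (pvRaiseWitness_rngids_calc.2.2.1) (pvRaiseWitness_rngids_calc.2.2.2.1) (pvRaiseWitness_rngids_calc.2.2.2.2) ∧ rngids_calc_alt (pvRaiseWitness_rngids_calc.1) (pvRaiseWitness_rngids_calc.2.1)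 (pvRaiseWitness_rngids_calc.2.2.1) (pvRaiseWitness_rngids_calc.2.2.2.1) (pvRaiseWitness_rngids_calc.2.2.2.2) = pvRaiseWitnessOut_rngids_calc)

-- ===== LEMMAS AND PROOFS =====

-- Python floor-mod absorbs an already-reduced summand.
lemma pv_mod_add (a b n : Int) : PySem.Int.mod (PySem.Int.mod a n + b) n = PySem.Int.mod (a + b) n := by
  simp [PySem.Int.mod]

-- block i of the closed form (m = itm.toNat)
def pvBlk (npts k step : Int) (m : Nat) (i : Int) : List Int :=
  (List.range m).map (fun (j : Nat) => PySem.Int.mod (k + i * step + (j : Int)) npts)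

def pvAll (npts k step : Int) (m : Nat) (n : Nat) : List Int :=
  (List.range n).flatMap (fun (i : Nat) => pvBlk npts k step m (i : Int))

lemma pvAll_succ (npts k step : Int) (m n : Nat) :
    pvAll npts k step m (n + 1) = pvAll npts k step m n ++ pvBlk npts k step m (n : Int) := by
  simp [pvAll, List.range_succ]

-- last element of pvAll (n+1): the last element of block n
lemma pvAll_last (npts k step : Int) (m n : Nat) (hm : 0 < m) (d : Int) :
    PySem.List.pyGetD (pvAll npts k step m (n + 1)) (-1) d =
      PySem.Int.mod (k + (n : Int) * step + ((m : Int) - 1)) npts := by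
  obtain ⟨m', rfl⟩ : ∃ m', m = m' + 1 := ⟨m - 1, by omega⟩
  rw [pvAll_succ]
  have hblk : pvBlk npts k step (m' + 1) (n : Int) =
      (List.range m').map (fun (j : Nat) => PySem.Int.mod (k + (n : Int) * step + (j : Int)) npts)
        ++ [PySem.Int.mod (k + (n : Int) * step + (m' : Int)) npts] := by
    simp [pvBlk, List.range_succ]
  rw [hblk, ← List.append_assoc,
    PySem.List.pyGetD_neg_one_append_singleton
      (pvAll npts k step (m' + 1) n ++ (List.range m').map (fun (j : Nat) => PySem.Int.mod (k + (n : Int) * step + (j : Int)) npts))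
      (PySem.Int.mod (k + (n : Int) * step + (m' : Int)) npts) d]
  congr 1
  push_cast
  ring

-- one iteration of A's loop body maps pvAll (n+1) to pvAll (n+2)
lemma pv_step (npts k itm gap : Int) (hitm : 1 ≤ itm) (n : Nat) :
    (fun ids =>
        ids ++ (PySem.List.pyRange (PySem.List.pyGetD ids (-1) 0 + (gap + 1))
            (PySem.List.pyGetD ids (-1) 0 + (gap + 1) + itm) 1).map (fun j => PySem.Int.mod j npts))
        (pvAll npts k (itm + gap) itm.toNat (n + 1))
      = pvAll npts k (itm + gap) itm.toNat (n + 2) := by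
  have hm : 0 < itm.toNat := by omega
  rw [pvAll_succ npts k (itm + gap) itm.toNat (n + 1)]
  simp only [pvAll_last npts k (itm + gap) itm.toNat n hm 0]
  congr 1
  set L := PySem.Int.mod (k + (n : Int) * (itm + gap) + ((itm.toNat : Int) - 1)) npts with hL
  rw [PySem.List.pyRange_one (L + (gap + 1)) (L + (gap + 1) + itm)]
  have : (L + (gap + 1) + itm - (L + (gap + 1))).toNat = itm.toNat := by omega
  rw [this, List.map_map, pvBlk]
  apply List.map_congr_left
  intro j _
  simp only [Function.comp]
  rw [hL, add_assoc, pv_mod_add]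
  congr 1
  have h1 : ((itm.toNat : Int)) = itm := by omega
  rw [h1]
  push_cast
  ring

-- A's loop = iterating the step function
lemma pv_loop (npts k itm gap : Int) (hitm : 1 ≤ itm) (N : Nat) :
    Nat.iterate (fun ids =>
        ids ++ (PySem.List.pyRange (PySem.List.pyGetD ids (-1) 0 + (gap + 1))
            (PySem.List.pyGetD ids (-1) 0 + (gap + 1) + itm) 1).map (fun j => PySem.Int.mod j npts))
      N (pvAll npts k (itm + gap) itm.toNat 1)
      = pvAll npts k (itm + gap) itm.toNat (N + 1) := by
  induction N with
  | zero => rfl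
  | succ n ih =>
    rw [Function.iterate_succ_apply', ih]
    exact pv_step npts k itm gap hitm n

-- the first block, as both ports compute it
lemma pv_block0 (npts k itm step : Int) :
    (PySem.List.pyRange k (k + itm) 1).map (fun i => PySem.Int.mod i npts)
      = pvBlk npts k step itm.toNat 0 := by
  rw [PySem.List.pyRange_one k (k + itm)]
  have : (k + itm - k).toNat = itm.toNat := by omega
  rw [this, List.map_map, pvBlk]
  apply List.map_congr_left
  intro j _
  simp [Function.comp]

lemma pv_b_guard (npts k itm : Int) :
    (PySem.List.pyRange 0 itm 1).map (fun j => PySem.Int.mod (k + j) npts)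
      = pvBlk npts k 0 itm.toNat 0 := by
  rw [PySem.List.pyRange_one 0 itm]
  have : (itm - 0).toNat = itm.toNat := by omega
  rw [this, List.map_map, pvBlk]
  apply List.map_congr_left
  intro j _
  simp [Function.comp]

-- B's flatMap equals pvAll reps.toNat
lemma pv_b_main (npts k itm gap reps : Int) (hr : 0 ≤ reps) :
    (PySem.List.pyRange 0 reps 1).flatMap
        (fun i => (PySem.List.pyRange 0 itm 1).map (fun j => PySem.Int.mod (k + i * (itm + gap) + j) npts))
      = pvAll npts k (itm + gap) itm.toNat reps.toNat := by
  rw [PySem.List.pyRange_one 0 reps]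
  have : (reps - 0).toNat = reps.toNat := by omega
  rw [this]
  rw [List.flatMap_map]
  unfold pvAll
  apply List.flatMap_congr
  intro i _
  simp only [zero_add]
  rw [PySem.List.pyRange_one 0 itm]
  have h2 : (itm - 0).toNat = itm.toNat := by omega
  rw [h2, List.map_map, pvBlk]
  apply List.map_congr_left
  intro j _
  simp [Function.comp]

-- ===== VERDICT (by name: the statement is the Claim_ definition above) =====
theorem rngids_calc_spec : Claim_equal_rngids_calc := by
  intro npts k itm gap reps _hDom hPre
  unfold Spec_rngids_calc rngids_calc rngids_calc_alt
  by_cases hg : (npts == itm || decide (reps < 2)) = true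
  · simp only [hg, if_true]
    rw [pv_block0 npts k itm 0, pv_b_guard]
  · rw [Bool.not_eq_true] at hg
    simp only [hg, Bool.false_eq_true, if_false]
    have hgap : ¬ (npts = itm) ∧ 2 ≤ reps := by
      simp only [Bool.or_eq_false_iff, beq_eq_false_iff_ne, ne_eq, decide_eq_false_iff_not, not_lt] at hg
      exact ⟨hg.1, by omega⟩
    have hitm : 1 ≤ itm := by
      by_contra h
      rcases hPre.2 (by omega) with h1 | h2
      · exact hgap.1 h1
      · omega
    -- the loop
    rw [List.foldl_const]
    rw [PySem.List.length_pyRange_one]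
    rw [pv_block0 npts k itm (itm + gap)]
    have h0 : pvBlk npts k (itm + gap) itm.toNat 0 = pvAll npts k (itm + gap) itm.toNat 1 := by
      simp [pvAll, pvBlk, List.range_succ]
    rw [h0, pv_loop npts k itm gap hitm]
    have hr2 : 2 ≤ reps := hgap.2
    have hblk : (if itm > 0 then reps else (0 : Int)) = reps := if_pos (by omega)
    rw [hblk, pv_b_main npts k itm gap reps (by omega)]
    have : (reps - 1 - 0).toNat + 1 = reps.toNat := by omega
    rw [this]

theorem rngids_calc_raises : Claim_raises_rngids_calc := by
  unfold Claim_raises_rngids_calc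
  constructor
  · intro npts k itm gap reps _ hR hPre
    obtain ⟨h1, h2, h3⟩ := hR
    rcases hPre.2 h1 with h | h
    · exact h2 h
    · omega
  · exact ⟨by decide, by decide, by decide⟩

-- self-check: the raise-witness value B returns, extracted from the theorem above
theorem pvRaiseWitness_rngids_calc_ok :
    rngids_calc_alt 5 0 0 1 3 = pvRaiseWitnessOut_rngids_calc := rngids_calc_raises.2.2.2
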